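-- pv_equiv track=rewrite | github.com/shoredata/galvanize-dsi | dsi-week-zero/day-2-collections-and-iteration/solutions/solutions.py | triangle_sum
-- ===== SOURCE A (Python) =====
-- def triangle_sum(triangle):
--     diagonal_sums = []
--     for diagonal_number in range(len(triangle)):
--         acc = 0
--         for diagonal_position in range(len(triangle) - diagonal_number):
--            acc = acc + triangle[diagonal_number + diagonal_position][diagonal_position]
--         diagonal_sums.append(acc)
--     return list(reversed(diagonal_sums))
-- ===== SOURCE B (Python) =====
-- def triangle_sum(triangle):
--     if not triangle:
--         return []
--     main_diag = sum(row[i] for i, row in enumerate(triangle))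
--     return triangle_sum(triangle[1:]) + [main_diag]
-- ===== Notes on version B (the rewrite author's own statement) =====
-- stated objective: alternative
-- what changed: Replaces A's iterative double loop (outer loop over diagonals, running accumulator along each, then an explicit final reversal) by structural recursion on the row list: the result for t is the result for t[1:] with the main-diagonal sum of t appended, so the reversed order falls out of the recursion and no bucket/reversal step exists.
import Mathlib
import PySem

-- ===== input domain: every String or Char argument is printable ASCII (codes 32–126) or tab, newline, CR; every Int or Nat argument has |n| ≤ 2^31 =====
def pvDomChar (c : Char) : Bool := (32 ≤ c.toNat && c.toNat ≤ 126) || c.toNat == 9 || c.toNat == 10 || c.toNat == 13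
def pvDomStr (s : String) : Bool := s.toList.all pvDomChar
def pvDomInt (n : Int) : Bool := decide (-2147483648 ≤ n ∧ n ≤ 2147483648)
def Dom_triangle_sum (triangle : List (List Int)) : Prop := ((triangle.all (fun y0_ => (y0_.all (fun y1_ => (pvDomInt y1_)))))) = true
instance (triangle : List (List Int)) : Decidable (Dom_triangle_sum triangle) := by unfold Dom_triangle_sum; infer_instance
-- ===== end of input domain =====

-- B replaces A's double loop + final reversal by structural recursion on the rows (alternative decomposition, same cost); both raise IndexError on rows shorter than their index, excluded by Pre_.


-- ===== PORT A =====
-- gather: for each diagonal_number, run an accumulator along that diagonal, then reverse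
def triangle_sum (triangle : List (List Int)) : List Int :=
  ((PySem.List.pyRange 0 (triangle.length : Int) 1).foldl (fun ds d =>
      ds ++ [(PySem.List.pyRange 0 ((triangle.length : Int) - d) 1).foldl
        (fun acc p => acc + PySem.List.pyGetD (PySem.List.pyGetD triangle (d + p) []) p 0) 0]) []).reverse

-- ===== PORT B =====
-- sum(row[i] for i, row in enumerate(triangle)) — the main-diagonal sum
def mainDiag (t : List (List Int)) : Int :=
  (PySem.List.enumerate t 0).foldl (fun acc ir => acc + PySem.List.pyGetD ir.2 ir.1 0) 0

-- structural recursion: result for t = result for t[1:] ++ [main-diagonal sum of t]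
def triangle_sum_alt (triangle : List (List Int)) : List Int :=
  match triangle with
  | [] => []
  | r :: rest => triangle_sum_alt (rest) ++ [mainDiag (r :: rest)]

-- ===== PRECONDITION & SPEC =====
-- Pre_ excludes exactly the inputs on which Python A raises IndexError: some row i shorter than i+1.
def Pre_triangle_sum (triangle : List (List Int)) : Prop :=
  ∀ i < triangle.length, i < (triangle.getD i []).length
instance (triangle : List (List Int)) : Decidable (Pre_triangle_sum triangle) := by
  unfold Pre_triangle_sum; infer_instance
def pvWitness_triangle_sum : List (List Int) := [[1], [2, 3], [4, 5, 6]]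

def Spec_triangle_sum (triangle : List (List Int)) (out : List Int) : Prop := out = triangle_sum_alt triangle
instance (triangle : List (List Int)) (out : List Int) : Decidable (Spec_triangle_sum triangle out) := by unfold Spec_triangle_sum; infer_instance

-- ===== CLAIM (what is proved, stated in full; the proofs are below) =====
def Claim_equal_triangle_sum : Prop := ∀ (triangle : List (List Int)), Dom_triangle_sum triangle → Pre_triangle_sum triangle → Spec_triangle_sum triangle (triangle_sum triangle)

-- ===== LEMMAS AND PROOFS =====

-- the sum along diagonal d of a triangle with n rows (both ports are reduced to this form)
def rowSum (t : List (List Int)) (d n : Nat) : Int :=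
  ((List.range (n - d)).map (fun p => (t.getD (d + p) []).getD p 0)).sum

theorem a_eq_rowSum (t : List (List Int)) :
    triangle_sum t = ((List.range t.length).map (fun d => rowSum t d t.length)).reverse := by
  unfold triangle_sum
  rw [PySem.List.foldl_append_singleton_eq_map, PySem.List.pyRange_zero_natCast, List.map_map]
  congr 1
  apply List.map_congr_left
  intro d hd
  rw [List.mem_range] at hd
  simp only [Function.comp_apply]
  rw [PySem.List.foldl_add]
  have hcast : (t.length : Int) - (d : Int) = ((t.length - d : Nat) : Int) := by omega
  rw [hcast, PySem.List.pyRange_zero_natCast, List.map_map]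
  unfold rowSum
  have : ∀ p : Nat, ((fun p => PySem.List.pyGetD (PySem.List.pyGetD t ((d:Int) + p) []) p 0) ∘ (fun k : Nat => (k:Int))) p
      = (t.getD (d + p) []).getD p 0 := by
    intro p
    simp only [Function.comp_apply]
    rw [show (d:Int) + (p:Int) = ((d+p : Nat) : Int) by push_cast; ring,
        PySem.List.pyGetD_natCast, PySem.List.pyGetD_natCast]
  rw [List.map_congr_left (fun p _ => this p)]
  ring

theorem enumerate_foldl_getD (t : List (List Int)) (m : Nat) (a : Int) :
    (PySem.List.enumerate t (m : Int)).foldl (fun acc ir => acc + PySem.List.pyGetD ir.2 ir.1 0) a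
      = a + ((List.range t.length).map (fun q => (t.getD q []).getD (m + q) 0)).sum := by
  induction t generalizing m a with
  | nil => simp [PySem.List.enumerate_nil]
  | cons r rest ih =>
    rw [PySem.List.enumerate_cons, List.foldl_cons,
        show ((m : Int) + 1) = ((m + 1 : Nat) : Int) by push_cast; ring, ih (m + 1)]
    rw [List.length_cons, List.range_succ_eq_map, List.map_cons, List.map_map, List.sum_cons]
    rw [PySem.List.pyGetD_natCast]
    have : ∀ q ∈ List.range rest.length,
        ((fun q => ((r :: rest).getD q []).getD (m + q) 0) ∘ Nat.succ) q
          = (fun q => (rest.getD q []).getD (m + 1 + q) 0) q := by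
      intro q _
      simp only [Function.comp_apply, List.getD_cons_succ]
      rw [show m + Nat.succ q = m + 1 + q by omega]
    rw [List.map_congr_left this]
    simp only [List.getD_cons_zero, Nat.add_zero]
    ring

theorem mainDiag_eq (t : List (List Int)) :
    mainDiag t = rowSum t 0 t.length := by
  unfold mainDiag rowSum
  have h := enumerate_foldl_getD t 0 0
  norm_num at h
  rw [h]
  simp

theorem rowSum_cons (r : List Int) (rs : List (List Int)) (d : Nat) :
    rowSum rs d rs.length = rowSum (r :: rs) (d + 1) (rs.length + 1) := by
  unfold rowSum
  rw [show rs.length + 1 - (d + 1) = rs.length - d by omega]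
  apply congrArg
  apply List.map_congr_left
  intro p _
  rw [show d + 1 + p = (d + p) + 1 by omega, List.getD_cons_succ]

theorem b_eq_rowSum (t : List (List Int)) :
    triangle_sum_alt t = ((List.range t.length).map (fun d => rowSum t d t.length)).reverse := by
  induction t with
  | nil => simp [triangle_sum_alt]
  | cons r rest ih =>
    show triangle_sum_alt rest ++ [mainDiag (r :: rest)] = _
    rw [ih, mainDiag_eq, List.length_cons, List.range_succ_eq_map, List.map_cons, List.map_map,
        List.reverse_cons]
    congr 1
    apply congrArg
    apply List.map_congr_left
    intro d _
    simp only [Function.comp_apply]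
    exact rowSum_cons r rest d

-- ===== VERDICT (by name: the statement is the Claim_ definition above) =====
theorem triangle_sum_spec : Claim_equal_triangle_sum := by
  intro t _ _
  unfold Spec_triangle_sum
  rw [a_eq_rowSum, b_eq_rowSum]
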